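-- pv_equiv track=rewrite | github.com/jonathanballs/aoc-2023 | 02/script.py | merge_handfuls
-- ===== SOURCE A (Python) =====
-- def merge_handfuls(handfuls):
--     ball_totals = dict()
--     for handful in handfuls:
--         for key in handful.keys():
--             if key not in ball_totals:
--                 ball_totals[key] = handful[key]
--             elif ball_totals[key] < handful[key]:
--                 ball_totals[key] = handful[key]
--
--     return ball_totals
-- ===== SOURCE B (Python) =====
-- def merge_handfuls(handfuls):
--     # Gather-then-reduce: first group every observed count by color, then take each group's max.
--     table = {}
--     for handful in handfuls:
--         for key, value in handful.items():
--             table.setdefault(key, []).append(value)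
--     return {k: max(vs) for k, vs in table.items()}
-- ===== Notes on version B (the rewrite author's own statement) =====
-- stated objective: alternative
-- what changed: Replaces the online running-max update of a totals dict with a gather-then-reduce shape: one pass appends every count into a per-color list, a second pass takes max of each list.
import Mathlib
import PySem

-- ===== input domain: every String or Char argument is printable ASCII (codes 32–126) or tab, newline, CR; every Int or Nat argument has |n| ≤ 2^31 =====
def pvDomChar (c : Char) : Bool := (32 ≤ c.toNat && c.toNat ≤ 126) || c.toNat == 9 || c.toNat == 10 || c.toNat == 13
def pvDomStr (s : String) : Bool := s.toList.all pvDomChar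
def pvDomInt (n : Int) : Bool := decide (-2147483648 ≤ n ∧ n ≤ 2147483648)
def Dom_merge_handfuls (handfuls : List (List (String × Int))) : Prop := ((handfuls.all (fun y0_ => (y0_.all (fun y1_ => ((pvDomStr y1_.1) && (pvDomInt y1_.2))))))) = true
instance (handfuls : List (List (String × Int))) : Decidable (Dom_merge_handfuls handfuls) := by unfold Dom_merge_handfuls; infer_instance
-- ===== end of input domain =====

-- B replaces A's online running-max update with a gather-then-reduce pass (group all counts per color, then max each group); same cost, different shape.


-- ===== PORT A =====
-- each inner list is a Python dict; PySem.Dict.ofList reconstructs it (insertion order, overwrite in place)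
def mergeStepA (bt : PySem.Dict String Int) (kv : String × Int) : PySem.Dict String Int :=
  if !(bt.contains kv.1) then bt.insert kv.1 kv.2
  else if bt.getD kv.1 0 < kv.2 then bt.insert kv.1 kv.2
  else bt

def merge_handfuls (handfuls : List (List (String × Int))) : List (String × Int) :=
  (handfuls.foldl
    (fun bt handful => (PySem.Dict.ofList handful).items.foldl mergeStepA bt)
    PySem.Dict.empty).items

-- ===== PORT B =====
-- table.setdefault(key, []).append(value)  ==  table[key] = table.get(key, []) + [value]
def groupStepB (t : PySem.Dict String (List Int)) (kv : String × Int) : PySem.Dict String (List Int) :=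
  t.modify kv.1 [] (fun vs => vs ++ [kv.2])

-- max(vs) for the (always nonempty) group lists; the getD 0 arm is Python's unreachable max([]) case
def pyMaxD (vs : List Int) : Int := (PySem.List.max? vs (fun y => y)).getD 0

def merge_handfuls_alt (handfuls : List (List (String × Int))) : List (String × Int) :=
  let table := handfuls.foldl
    (fun t handful => (PySem.Dict.ofList handful).items.foldl groupStepB t)
    PySem.Dict.empty
  table.items.map (fun p => (p.1, pyMaxD p.2))

-- ===== PRECONDITION & SPEC =====
def Spec_merge_handfuls (handfuls : List (List (String × Int))) (out : List (String × Int)) : Prop := out = merge_handfuls_alt handfuls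
instance (handfuls : List (List (String × Int))) (out : List (String × Int)) : Decidable (Spec_merge_handfuls handfuls out) := by unfold Spec_merge_handfuls; infer_instance

-- ===== CLAIM (what is proved, stated in full; the proofs are below) =====
def Claim_equal_merge_handfuls : Prop := ∀ (handfuls : List (List (String × Int))), Dom_merge_handfuls handfuls → Spec_merge_handfuls handfuls (merge_handfuls handfuls)

-- ===== LEMMAS AND PROOFS =====

-- invariant linking A's totals dict to B's grouping table
def RelAB (d : PySem.Dict String Int) (t : PySem.Dict String (List Int)) : Prop :=
  t.keys.Nodup ∧ (∀ p ∈ t.items, p.2 ≠ []) ∧ d.items = t.items.map (fun p => (p.1, pyMaxD p.2))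

theorem pyMaxD_singleton (v : Int) : pyMaxD [v] = v := by
  simp [pyMaxD, PySem.List.max?_id_cons]

theorem pyMaxD_append_singleton (vs : List Int) (h : vs ≠ []) (v : Int) :
    pyMaxD (vs ++ [v]) = max (pyMaxD vs) v := by
  cases vs with
  | nil => exact absurd rfl h
  | cons x t => simp [pyMaxD, PySem.List.max?_id_cons, List.foldl_append]

theorem relAB_step (d : PySem.Dict String Int) (t : PySem.Dict String (List Int))
    (kv : String × Int) (h : RelAB d t) : RelAB (mergeStepA d kv) (groupStepB t kv) := by
  obtain ⟨hnd, hne, hitems⟩ := h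
  obtain ⟨k, v⟩ := kv
  have hkeys : d.keys = t.keys := by
    simp [PySem.Dict.keys, hitems, List.map_map, Function.comp]
  have hcont : d.contains k = t.contains k := by
    rw [PySem.Dict.contains_eq_decide_mem_keys, PySem.Dict.contains_eq_decide_mem_keys, hkeys]
  have hmod : groupStepB t (k, v) = t.insert k (t.getD k [] ++ [v]) := rfl
  by_cases hc : t.contains k = true
  · -- key already present: B appends to its group, A keeps the running max
    obtain ⟨p, hp, hpk⟩ := List.mem_map.mp ((PySem.Dict.contains_iff_mem_keys t k).mp hc)
    have hp2 : t.getD k [] = p.2 := by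
      have : (k, p.2) ∈ t.items := by rwa [← hpk, Prod.mk.eta]
      exact PySem.Dict.getD_of_mem_items t this hnd []
    have hdnd : d.keys.Nodup := hkeys ▸ hnd
    have hcur : d.getD k 0 = pyMaxD (t.getD k []) := by
      have hmem : (k, pyMaxD p.2) ∈ d.items := by
        rw [hitems]; exact List.mem_map.mpr ⟨p, hp, by rw [hpk]⟩
      rw [hp2]; exact PySem.Dict.getD_of_mem_items d hmem hdnd 0
    have hcd : d.contains k = true := hcont.trans hc
    refine ⟨?_, ?_, ?_⟩
    · rw [hmod, PySem.Dict.keys_insert_of_contains t _ hc]; exact hnd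
    · rw [hmod, PySem.Dict.items_insert_of_contains t _ hc]
      intro q hq
      obtain ⟨r, hr, hrq⟩ := List.mem_map.mp hq
      by_cases hrk : (r.1 == k) = true
      · simp only [hrk, if_true] at hrq
        rw [← hrq]
        exact List.append_ne_nil_of_right_ne_nil _ (List.cons_ne_nil v [])
      · rw [if_neg hrk] at hrq; rw [← hrq]; exact hne r hr
    · have hrhs : (t.insert k (t.getD k [] ++ [v])).items.map (fun p => (p.1, pyMaxD p.2)) =
          t.items.map (fun q => if q.1 = k then (k, max (d.getD k 0) v) else (q.1, pyMaxD q.2)) := by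
        rw [PySem.Dict.items_insert_of_contains t _ hc, List.map_map]
        apply List.map_congr_left
        intro q hq
        by_cases hqk : q.1 = k
        · have hq2 : t.getD k [] = q.2 := by
            have : (k, q.2) ∈ t.items := by rwa [← hqk, Prod.mk.eta]
            exact PySem.Dict.getD_of_mem_items t this hnd []
          simp only [Function.comp_apply, hqk, beq_self_eq_true, if_true]
          rw [hcur, hq2, pyMaxD_append_singleton q.2 (hne q hq) v]
        · simp [Function.comp, hqk]
      rw [hmod, hrhs]
      by_cases hlt : d.getD k 0 < v
      · simp only [mergeStepA, hcd, Bool.not_true, Bool.false_eq_true, if_false, hlt, if_true]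
        rw [PySem.Dict.items_insert_of_contains d _ hcd, hitems, List.map_map]
        apply List.map_congr_left
        intro q hq
        by_cases hqk : q.1 = k
        · simp [Function.comp, hqk, max_eq_right (le_of_lt hlt)]
        · simp [Function.comp, hqk]
      · simp only [mergeStepA, hcd, Bool.not_true, Bool.false_eq_true, if_false, hlt, if_false]
        rw [hitems]
        apply List.map_congr_left
        intro q hq
        by_cases hqk : q.1 = k
        · have hq2 : t.getD k [] = q.2 := by
            have : (k, q.2) ∈ t.items := by rwa [← hqk, Prod.mk.eta]
            exact PySem.Dict.getD_of_mem_items t this hnd []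
          have : pyMaxD q.2 = d.getD k 0 := by rw [hcur, hq2]
          simp [hqk, this, max_eq_left (le_of_not_gt hlt)]
        · simp [hqk]
  · -- fresh key: both append a new entry
    have hc' : t.contains k = false := by simpa using hc
    have hcd : d.contains k = false := hcont.trans hc'
    have hget : t.getD k [] = [] := PySem.Dict.getD_of_not_contains t [] hc'
    have hknotmem : k ∉ t.keys := fun hm => hc ((PySem.Dict.contains_iff_mem_keys t k).mpr hm)
    refine ⟨?_, ?_, ?_⟩
    · rw [hmod, PySem.Dict.keys_insert_of_not_contains t _ hc']
      simp only [List.nodup_append, List.nodup_cons, List.not_mem_nil, not_false_iff,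
        List.nodup_nil, and_true, true_and]
      refine ⟨hnd, fun a ha b hb hab => ?_⟩
      rw [List.mem_singleton] at hb
      exact hknotmem (hb ▸ hab ▸ ha)
    · rw [hmod, PySem.Dict.items_insert_of_not_contains t _ hc', hget]
      intro q hq
      rcases List.mem_append.mp hq with h1 | h1
      · exact hne q h1
      · simp at h1; rw [h1]; simp
    · simp only [mergeStepA, hcd, Bool.not_false, if_true]
      rw [PySem.Dict.items_insert_of_not_contains d _ hcd, hmod,
        PySem.Dict.items_insert_of_not_contains t _ hc', hget, hitems, List.map_append]
      simp [pyMaxD_singleton]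

theorem relAB_fold (ps : List (String × Int)) (d : PySem.Dict String Int)
    (t : PySem.Dict String (List Int)) (h : RelAB d t) :
    RelAB (ps.foldl mergeStepA d) (ps.foldl groupStepB t) := by
  induction ps generalizing d t with
  | nil => exact h
  | cons kv ps ih => exact ih _ _ (relAB_step d t kv h)

theorem relAB_outer (hs : List (List (String × Int))) (d : PySem.Dict String Int)
    (t : PySem.Dict String (List Int)) (h : RelAB d t) :
    RelAB (hs.foldl (fun bt handful => (PySem.Dict.ofList handful).items.foldl mergeStepA bt) d)
          (hs.foldl (fun t handful => (PySem.Dict.ofList handful).items.foldl groupStepB t) t) := by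
  induction hs generalizing d t with
  | nil => exact h
  | cons hf hs ih => exact ih _ _ (relAB_fold _ d t h)

-- ===== VERDICT (by name: the statement is the Claim_ definition above) =====
theorem merge_handfuls_spec : Claim_equal_merge_handfuls := by
  intro handfuls _
  have h := relAB_outer handfuls PySem.Dict.empty PySem.Dict.empty
    ⟨by simp [PySem.Dict.empty, PySem.Dict.keys], by simp [PySem.Dict.empty], by
      simp [PySem.Dict.empty]⟩
  exact h.2.2
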